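-- pv_equiv track=rewrite | github.com/cgartco6/soccer-prediction-ai | src/prediction/match_analyzer.py | identify_streak
-- ===== SOURCE A (Python) =====
-- from typing import Dict, List, Tuple, Optional
--
-- def identify_streak(form: List[str]) -> Optional[str]:
--     """Identify winning or losing streaks"""
--     if len(form) < 3:
--         return None
--
--     last_3 = form[-3:]
--     if all(r == 'W' for r in last_3):
--         return "3-game winning"
--     elif all(r == 'L' for r in last_3):
--         return "3-game losing"
--     elif all(r == 'D' for r in last_3):
--         return "3-game drawing"
--
--     return None
-- ===== SOURCE B (Python) =====
-- def identify_streak(form):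
--     """Identify winning or losing streaks"""
--     streak = 0
--     last = None
--     for r in reversed(form):
--         if streak == 0:
--             last = r
--             streak = 1
--         elif r == last:
--             streak += 1
--         else:
--             break
--     if streak >= 3:
--         if last == 'W':
--             return "3-game winning"
--         if last == 'L':
--             return "3-game losing"
--         if last == 'D':
--             return "3-game drawing"
--     return None
-- ===== Notes on version B (the rewrite author's own statement) =====
-- stated objective: alternative
-- what changed: Replaces the fixed last-3 window with three all(...) scans by a single backward pass with an accumulator that computes the run length of the final result and then checks streak >= 3.
import Mathlib
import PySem

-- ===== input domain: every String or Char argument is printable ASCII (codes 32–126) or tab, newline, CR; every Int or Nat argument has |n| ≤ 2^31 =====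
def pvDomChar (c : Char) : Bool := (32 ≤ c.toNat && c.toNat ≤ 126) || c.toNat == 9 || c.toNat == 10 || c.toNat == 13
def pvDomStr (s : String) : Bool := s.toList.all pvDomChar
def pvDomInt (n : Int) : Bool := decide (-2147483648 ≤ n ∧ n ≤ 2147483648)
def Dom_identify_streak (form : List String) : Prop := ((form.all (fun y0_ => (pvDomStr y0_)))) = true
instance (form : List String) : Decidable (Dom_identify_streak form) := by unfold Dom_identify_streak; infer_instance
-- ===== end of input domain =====

-- B: single backward pass computing the trailing run length, then a streak >= 3 check (alternative decomposition).


-- ===== PORT A =====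
def identify_streak (form : List String) : Option String :=
  if form.length < 3 then none
  else
    let last_3 := PySem.List.slice form (some (-3)) none
    if last_3.all (fun r => r == "W") then some "3-game winning"
    else if last_3.all (fun r => r == "L") then some "3-game losing"
    else if last_3.all (fun r => r == "D") then some "3-game drawing"
    else none

-- ===== PORT B =====
-- the loop body of B's backward pass over reversed(form): counts the run of elements equal to `last`
def pvRunLen (last : String) : List String → Nat
  | [] => 0
  | r :: rest => if r == last then 1 + pvRunLen last rest else 0   -- `break` on mismatch

def identify_streak_alt (form : List String) : Option String :=
  -- first iteration of B's loop sets `last` and streak := 1; the rest counts while equal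
  match form.reverse with
  | [] => none
  | r :: rest =>
    let streak := 1 + pvRunLen r rest
    if 3 ≤ streak then
      if r == "W" then some "3-game winning"
      else if r == "L" then some "3-game losing"
      else if r == "D" then some "3-game drawing"
      else none
    else none

-- ===== PRECONDITION & SPEC =====
def Spec_identify_streak (form : List String) (out : Option String) : Prop := out = identify_streak_alt form
instance (form : List String) (out : Option String) : Decidable (Spec_identify_streak form out) := by unfold Spec_identify_streak; infer_instance

-- ===== CLAIM (what is proved, stated in full; the proofs are below) =====
def Claim_equal_identify_streak : Prop := ∀ (form : List String), Dom_identify_streak form → Spec_identify_streak form (identify_streak form)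

-- ===== LEMMAS AND PROOFS =====

-- the last three elements of (a :: b :: c :: rest).reverse are [c, b, a]
theorem last3_reverse (a b c : String) (rest : List String) :
    PySem.List.slice ((a :: b :: c :: rest).reverse) (some (-3)) none = [c, b, a] := by
  have hlen : (a :: b :: c :: rest).reverse.length = rest.length + 3 := by
    simp [List.length_reverse]
  rw [PySem.List.slice_from_neg_ofNat _ 3 (by omega)]
  rw [hlen]
  show ((a :: b :: c :: rest).reverse).drop (rest.length + 3 - 3) = [c, b, a]
  simp [List.reverse_cons]

-- uniform trailing triple: the three all(...) scans reduce to the if-chain on the letter itself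
theorem pv_triple (a : String) :
    (if [a, a, a].all (fun r => r == "W") then some "3-game winning"
     else if [a, a, a].all (fun r => r == "L") then some "3-game losing"
     else if [a, a, a].all (fun r => r == "D") then some "3-game drawing"
     else none)
    = (if a == "W" then some "3-game winning"
       else if a == "L" then some "3-game losing"
       else if a == "D" then some "3-game drawing"
       else (none : Option String)) := by
  by_cases hW : a = "W"
  · subst hW; decide
  · by_cases hL : a = "L"
    · subst hL; decide
    · by_cases hD : a = "D"
      · subst hD; decide
      · simp [List.all_cons, hW, hL, hD]

-- non-uniform trailing triple: none of the three all(...) scans succeeds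
theorem pv_not_uniform (a b c : String) (h : ¬ (b = a ∧ c = a)) (s : String) :
    ([c, b, a].all (fun r => r == s)) = false := by
  by_contra hne
  simp only [Bool.not_eq_false, List.all_cons, List.all_nil, Bool.and_eq_true, beq_iff_eq] at hne
  exact h ⟨hne.2.1.trans hne.2.2.1.symm, hne.1.trans hne.2.2.1.symm⟩

-- ===== VERDICT (by name: the statement is the Claim_ definition above) =====
theorem identify_streak_spec : Claim_equal_identify_streak := by
  intro form _
  unfold Spec_identify_streak
  obtain ⟨g, rfl⟩ : ∃ g, form = g.reverse := ⟨form.reverse, (List.reverse_reverse form).symm⟩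
  match g with
  | [] => decide
  | [a] =>
      simp only [identify_streak, identify_streak_alt, List.reverse_reverse, pvRunLen]
      norm_num
  | [a, b] =>
      simp only [identify_streak, identify_streak_alt, List.reverse_reverse, pvRunLen]
      split_ifs <;> simp_all
  | a :: b :: c :: rest =>
      have hlen : ¬ (a :: b :: c :: rest).reverse.length < 3 := by
        simp [List.length_reverse]
      simp only [identify_streak, identify_streak_alt, List.reverse_reverse, hlen, if_false,
        last3_reverse, pvRunLen]
      by_cases hu : b = a ∧ c = a
      · rw [hu.1, hu.2]
        simp only [beq_self_eq_true, if_true]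
        have h3 : 3 ≤ 1 + (1 + (1 + pvRunLen a rest)) := by omega
        rw [if_pos h3]
        exact pv_triple a
      · have hA := pv_not_uniform a b c hu
        rw [if_neg (by simp [hA]), if_neg (by simp [hA]), if_neg (by simp [hA])]
        by_cases hb : b = a
        · have hc : ¬ c = a := fun hc => hu ⟨hb, hc⟩
          rw [if_pos (show (b == a) = true by simp [hb]),
              if_neg (show ¬ (c == a) = true by simp [hc]),
              if_neg (show ¬ 3 ≤ 1 + (1 + 0) by omega)]
        · rw [if_neg (show ¬ (b == a) = true by simp [hb]),
              if_neg (show ¬ 3 ≤ 1 + 0 by omega)]
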